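-- pv_equiv track=rewrite | github.com/rain2473/coding-test | 프로그래머스/unrated/133502. 햄버거 만들기/햄버거 만들기.py | solution
-- ===== SOURCE A (Python) =====
-- def solution(ingredient):
--     i,answer = 0,0
--     while i < len(ingredient)-1:
--         if ingredient[i:i+4] == [1,2,3,1]:
--             del ingredient[i:i+4]
--             i -= 3
--             answer += 1
--         else:
--             i += 1
--     return answer
-- ===== SOURCE B (Python) =====
-- def solution(ingredient):
--     stack = []
--     answer = 0
--     for x in ingredient:
--         stack.append(x)
--         if stack[-4:] == [1, 2, 3, 1]:
--             del stack[-4:]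
--             answer += 1
--     return answer
-- ===== Notes on version B (the rewrite author's own statement) =====
-- stated objective: faster
-- what changed: Replaced the backtracking scan with in-place slice deletion from the list (each hit costs an O(n) del plus a rescan) by a single-pass push/pop stack that counts a burger whenever the top four entries read 1,2,3,1.
import Mathlib
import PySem

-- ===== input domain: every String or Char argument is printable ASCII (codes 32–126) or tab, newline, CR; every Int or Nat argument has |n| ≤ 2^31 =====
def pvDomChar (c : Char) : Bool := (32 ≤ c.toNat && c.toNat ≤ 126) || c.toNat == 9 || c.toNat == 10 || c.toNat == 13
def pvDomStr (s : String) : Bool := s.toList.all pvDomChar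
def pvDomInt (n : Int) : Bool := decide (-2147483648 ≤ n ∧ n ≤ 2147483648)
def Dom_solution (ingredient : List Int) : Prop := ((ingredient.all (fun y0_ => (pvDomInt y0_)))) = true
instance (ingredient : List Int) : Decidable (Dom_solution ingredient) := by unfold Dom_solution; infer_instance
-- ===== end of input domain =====

-- B replaces A's quadratic delete-and-backtrack scan by a one-pass counting stack (asymptotically faster).
-- A mutates its argument in place (del ingredient[i:i+4]); B does not: the equivalence proved is about the return value.

-- ===== PORT A =====
-- Two lemmas the port's `decreasing_by` needs (cited by name there):
-- a start index below -3 … -1 can never produce a 4-element slice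
lemma slice_neg_ne (lst : List Int) (i : Int) (hneg : i < 0) (hge : -3 ≤ i) :
    PySem.List.slice lst (some i) (some (i + 4)) ≠ [1, 2, 3, 1] := by
  intro h
  have hlen : (PySem.List.slice lst (some i) (some (i + 4))).length = 4 := by rw [h]; rfl
  rw [PySem.List.length_slice] at hlen
  have h4 : i + 4 = ((i + 4).toNat : Int) := (Int.toNat_of_nonneg (by omega)).symm
  rw [h4, PySem.List.clampIdx_natCast] at hlen
  have h2 := PySem.List.clampIdx_le lst.length i
  omega

-- a matching slice pins down the window: 0 ≤ i, i+4 ≤ len, and the window is drop/take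
lemma slice_pat_pos (lst : List Int) (i : Int)
    (h : PySem.List.slice lst (some i) (some (i + 4)) = [1, 2, 3, 1]) (hge : -3 ≤ i) :
    0 ≤ i ∧ i.toNat + 4 ≤ lst.length ∧ (lst.drop i.toNat).take 4 = [1, 2, 3, 1] := by
  by_cases hi : 0 ≤ i
  · have hlen : (PySem.List.slice lst (some i) (some (i + 4))).length = 4 := by rw [h]; rfl
    rw [PySem.List.length_slice] at hlen
    have hc1 : i = ((i.toNat : Nat) : Int) := (Int.toNat_of_nonneg hi).symm
    have hc2 : i + 4 = (((i.toNat + 4 : Nat)) : Int) := by omega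
    rw [hc2, PySem.List.clampIdx_natCast] at hlen
    have e1 : PySem.List.clampIdx lst.length i = min i.toNat lst.length := by
      conv_lhs => rw [hc1]
      exact PySem.List.clampIdx_natCast lst.length i.toNat
    rw [e1] at hlen
    have hle : i.toNat + 4 ≤ lst.length := by omega
    refine ⟨hi, hle, ?_⟩
    rw [PySem.List.slice_toNat lst hi (by omega)] at h
    have h4 : (i + 4).toNat - i.toNat = 4 := by omega
    rwa [h4] at h
  · exact absurd h (slice_neg_ne lst i (by omega) hge)

-- while-loop of A as recursion on the decreasing measure 2*len - i + 3.
-- `del ingredient[i:i+4]` is written as lst[:i] ++ lst[i+4:]; this is exact whenever the branch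
-- executes, because the guard slice = [1,2,3,1] forces 0 ≤ i and i+4 ≤ len (no negative clamping).
-- The outer `i < -3` guard only makes the recursion well-founded: it is dead code, since the loop is
-- entered at i = 0 and i never drops below -3 (a deletion needs i ≥ 0 and does i -= 3).
def solutionLoop (lst : List Int) (i answer : Int) : Int :=
  if h0 : i < -3 then answer
  else if h1 : i < (lst.length : Int) - 1 then
    if h2 : PySem.List.slice lst (some i) (some (i + 4)) = [1, 2, 3, 1] then
      solutionLoop (PySem.List.slice lst none (some i) ++ PySem.List.slice lst (some (i + 4)) none)
        (i - 3) (answer + 1)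
    else
      solutionLoop lst (i + 1) answer
  else
    answer
  termination_by (2 * (lst.length : Int) - i + 3).toNat
  decreasing_by
  · obtain ⟨hi0, hle, -⟩ := slice_pat_pos lst i h2 (by omega)
    rw [PySem.List.slice_to lst (by omega : (0:Int) ≤ i),
      PySem.List.slice_from lst (by omega : (0:Int) ≤ i + 4)]
    simp
    omega
  · omega

def solution (ingredient : List Int) : Int :=
  solutionLoop ingredient 0 0

-- ===== PORT B =====
-- transliteration of Source B; the stack is represented top-first (Lean lists cons at the head),
-- so `stack.append(x)` is `x :: stack` and `stack[-4:] == [1,2,3,1]` is `st.take 4 = [1,3,2,1]`.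
def altStep (p : List Int × Int) (x : Int) : List Int × Int :=
  let st := x :: p.1
  if st.take 4 = [1, 3, 2, 1] then (st.drop 4, p.2 + 1) else (st, p.2)

def solution_alt (ingredient : List Int) : Int :=
  (ingredient.foldl altStep ([], 0)).2

-- ===== PRECONDITION & SPEC =====
def Spec_solution (ingredient : List Int) (out : Int) : Prop := out = solution_alt ingredient
instance (ingredient : List Int) (out : Int) : Decidable (Spec_solution ingredient out) := by unfold Spec_solution; infer_instance

-- ===== CLAIM (what is proved, stated in full; the proofs are below) =====
def Claim_equal_solution : Prop := ∀ (ingredient : List Int), Dom_solution ingredient → Spec_solution ingredient (solution ingredient)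

-- ===== LEMMAS AND PROOFS =====

-- a nonnegative-start slice of width 4 is the drop/take window
lemma slice_window (lst : List Int) (i : Int) (hi : 0 ≤ i) :
    PySem.List.slice lst (some i) (some (i + 4)) = (lst.drop i.toNat).take 4 := by
  rw [PySem.List.slice_toNat lst hi (by omega)]
  have h4 : (i + 4).toNat - i.toNat = 4 := by omega
  rw [h4]

-- the no-occurrence invariant carried by the main induction
def NoOcc (lst : List Int) (i : Int) : Prop :=
  ∀ j : Nat, (j : Int) < i → (lst.drop j).take 4 ≠ [1, 2, 3, 1]

-- main loop correspondence: A's loop state (lst, i) is B's stack (lst.take (i+3)).reverse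
-- with remaining input lst.drop (i+3)
lemma loop_eq (lst : List Int) (i answer : Int) (hge : -3 ≤ i) (hinv : NoOcc lst i) :
    solutionLoop lst i answer
      = (List.foldl altStep ((lst.take (i + 3).toNat).reverse, answer) (lst.drop (i + 3).toNat)).2 := by
  rw [solutionLoop]
  rw [dif_neg (by omega : ¬ i < -3)]
  split
  · rename_i h1
    split
    · rename_i h2
      -- match branch
      obtain ⟨hi0, hle, hwin⟩ := slice_pat_pos lst i h2 hge
      set m := i.toNat with hm
      have hdm : lst.drop m = 1 :: 2 :: 3 :: 1 :: lst.drop (m + 4) := by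
        have h := (List.take_append_drop 4 (lst.drop m)).symm
        rw [hwin] at h
        rw [h]
        simp [List.drop_drop]
      have h3 : lst.drop (m + 3) = 1 :: lst.drop (m + 4) := by
        have h := congrArg (List.drop 3) hdm
        simp [List.drop_drop] at h
        exact h
      have htake3 : lst.take (m + 3) = lst.take m ++ [1, 2, 3] := by
        rw [List.take_add, hdm]
        rfl
      -- rewrite the deleted list
      have hdel : PySem.List.slice lst none (some i) ++ PySem.List.slice lst (some (i + 4)) none
          = lst.take m ++ lst.drop (m + 4) := by
        rw [PySem.List.slice_to lst hi0, PySem.List.slice_from lst (by omega)]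
        congr 2
        omega
      rw [hdel]
      -- recursive call via the induction hypothesis
      have hrec := loop_eq (lst.take m ++ lst.drop (m + 4)) (i - 3) (answer + 1) (by omega) ?inv
      case inv =>
        intro j hj
        have hj4 : j + 4 ≤ m := by omega
        have hcomm : List.drop j (lst.take m ++ lst.drop (m + 4)) =
            List.drop j (lst.take m) ++ lst.drop (m + 4) := by
          rw [List.drop_append_of_le_length (by simp; omega)]
        rw [hcomm]
        have htk : (List.drop j (lst.take m) ++ lst.drop (m + 4)).take 4
            = (List.drop j lst).take 4 := by
          rw [List.take_append_of_le_length (by simp; omega)]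
          rw [List.drop_take, List.take_take]
          have hmin : min 4 (m - j) = 4 := by omega
          rw [hmin]
        rw [htk]
        exact hinv j (by omega)
      rw [hrec]
      -- identify both sides
      have htake : (lst.take m ++ lst.drop (m + 4)).take (i - 3 + 3).toNat = lst.take m := by
        have hmm : (i - 3 + 3).toNat = m := by omega
        rw [hmm, List.take_append_of_le_length (by simp; omega)]
        simp [List.take_take]
      have hdrop : (lst.take m ++ lst.drop (m + 4)).drop (i - 3 + 3).toNat = lst.drop (m + 4) := by
        have hmm : (i - 3 + 3).toNat = m := by omega
        rw [hmm, List.drop_append_of_le_length (by simp; omega)]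
        simp
      rw [htake, hdrop]
      -- one altStep on the RHS pops the pattern
      have hm3 : (i + 3).toNat = m + 3 := by omega
      rw [hm3, h3, List.foldl_cons]
      have hstep : altStep ((lst.take (m + 3)).reverse, answer) 1
          = ((lst.take m).reverse, answer + 1) := by
        unfold altStep
        rw [htake3]
        simp
      rw [hstep]
    · rename_i h2
      -- no-match branch
      have hrec := loop_eq lst (i + 1) answer (by omega) ?inv
      case inv =>
        intro j hj
        by_cases hji : (j : Int) < i
        · exact hinv j hji
        · have hj_eq : (j : Int) = i := by omega
          intro hc
          apply h2
          have hi0 : 0 ≤ i := by omega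
          rw [slice_window lst i hi0]
          have hjm : i.toNat = j := by omega
          rw [hjm]
          exact hc
      rw [hrec]
      by_cases hlen : (i + 3).toNat < lst.length
      · set m := (i + 3).toNat with hm
        have hm4 : (i + 1 + 3).toNat = m + 1 := by omega
        rw [hm4]
        rcases hD : lst.drop m with _ | ⟨e, rest⟩
        · exfalso
          have := congrArg List.length hD
          simp at this
          omega
        · have hrest : rest = lst.drop (m + 1) := by
            have h := congrArg (List.drop 1) hD
            simp [List.drop_drop] at h
            exact h.symm
          have htk1 : lst.take (m + 1) = lst.take m ++ [e] := by
            rw [List.take_add, hD]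
            rfl
          rw [List.foldl_cons]
          have hstep : altStep ((lst.take m).reverse, answer) e
              = ((lst.take (m + 1)).reverse, answer) := by
            unfold altStep
            have hne : (e :: (lst.take m).reverse).take 4 ≠ [1, 3, 2, 1] := by
              intro hc
              by_cases hm3 : 3 ≤ m
              · -- a pop here would mean the window at i matched, contradicting h2
                have hi0 : 0 ≤ i := by omega
                have hmi : m = i.toNat + 3 := by omega
                rcases hE : lst.drop i.toNat with _ | ⟨a, _ | ⟨b, _ | ⟨c, D3⟩⟩⟩
                · have := congrArg List.length hE; simp at this; omega
                · have := congrArg List.length hE; simp at this; omega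
                · have := congrArg List.length hE; simp at this; omega
                · have hD3 : D3 = lst.drop m := by
                    have h := congrArg (List.drop 3) hE
                    simp [List.drop_drop] at h
                    rw [hmi]
                    exact h.symm
                  have htkm : lst.take m = lst.take i.toNat ++ [a, b, c] := by
                    rw [hmi, List.take_add, hE]
                    rfl
                  rw [htkm] at hc
                  simp at hc
                  apply h2
                  rw [slice_window lst i hi0, hE, hD3, hD]
                  simp
                  tauto
              · -- stack still shorter than 4: length mismatch
                have := congrArg List.length hc
                simp at this
                omega
            rw [if_neg hne]
            simp only
            rw [htk1]
            simp
          rw [hstep, hrest]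
      · -- i+3 already past the end: both take-all / drop-nothing states coincide
        have ha : lst.length ≤ (i + 3).toNat := by omega
        have hb : lst.length ≤ (i + 1 + 3).toNat := by omega
        rw [List.take_of_length_le ha, List.take_of_length_le hb,
          List.drop_eq_nil_of_le ha, List.drop_eq_nil_of_le hb]
  · -- loop exit: i ≥ len - 1, so the remaining input is empty
    rename_i h1
    have ha : lst.length ≤ (i + 3).toNat := by omega
    rw [List.drop_eq_nil_of_le ha]
    rfl
  termination_by (2 * (lst.length : Int) - i + 3).toNat
  decreasing_by
  all_goals
    first
      | omega
      | (have hL : (List.take i.toNat lst ++ List.drop (i.toNat + 4) lst).length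
             = lst.length - 4 := by simp; omega
         rw [hL]
         omega)

-- the first (up to) three pushes never pop: the initial call with i = 0 matches the full stack run
lemma start_eq (lst : List Int) :
    (List.foldl altStep ((lst.take 3).reverse, 0) (lst.drop 3)).2
      = (List.foldl altStep ([], 0) lst).2 := by
  have s1 : ∀ a : Int, altStep ([], 0) a = ([a], 0) := by intro a; simp [altStep]
  have s2 : ∀ a b : Int, altStep ([a], 0) b = ([b, a], 0) := by intro a b; simp [altStep]
  have s3 : ∀ a b c : Int, altStep ([b, a], 0) c = ([c, b, a], 0) := by intro a b c; simp [altStep]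
  match lst with
  | [] => rfl
  | [a] => simp [s1 a]
  | [a, b] => simp [s1 a, s2 a b]
  | a :: b :: c :: t =>
    have h1 : List.take 3 (a :: b :: c :: t) = [a, b, c] := rfl
    have h2 : List.drop 3 (a :: b :: c :: t) = t := rfl
    rw [h1, h2]
    simp [s1 a, s2 a b, s3 a b c]

-- ===== VERDICT (by name: the statement is the Claim_ definition above) =====
theorem solution_spec : Claim_equal_solution := by
  intro ingredient _
  unfold Spec_solution solution solution_alt
  rw [loop_eq ingredient 0 0 (by omega) (by intro j hj; exact absurd hj (by omega))]
  have h3 : ((0 : Int) + 3).toNat = 3 := rfl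
  rw [h3]
  exact start_eq ingredient
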